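-- pv_equiv track=rewrite | github.com/ctc316/algorithm-python | Lintcode/Ladder_all_A_OA/1636. Aerial Movie.py | aerial_Movie
-- ===== SOURCE A (Python) =====
-- def aerial_Movie(t, dur):
--     t -= 30
--     dur.sort()
--     left = 0
--     right = len(dur) - 1
--     longest = 0
--     longest_pair = None
--     while left < right:
--         summ = dur[left] + dur[right]
--         if summ <= t and summ > longest:
--             longest = summ
--             longest_pair = [dur[left], dur[right]]
--
--         if summ < t:
--             left += 1
--         else:
--             right -= 1
--
--     return longest_pair
-- ===== SOURCE B (Python) =====
-- # B: per-index binary-search scan (hand-written bisect_right, verbatim CPython algorithm)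
-- # instead of A's converging two-pointer sweep. Sorts dur in place like A (observable mutation).
--
-- def _bisect_right(a, x):
--     lo, hi = 0, len(a)
--     while lo < hi:
--         mid = (lo + hi) // 2
--         if x < a[mid]:
--             hi = mid
--         else:
--             lo = mid + 1
--     return lo
--
-- def aerial_Movie(t, dur):
--     t -= 30
--     dur.sort()
--     longest = 0
--     longest_pair = None
--     for i in range(len(dur)):
--         j = _bisect_right(dur, t - dur[i]) - 1
--         if j > i:
--             summ = dur[i] + dur[j]
--             if summ > longest:
--                 longest = summ
--                 longest_pair = [dur[i], dur[j]]
--     return longest_pair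
-- ===== Notes on version B (the rewrite author's own statement) =====
-- stated objective: alternative
-- what changed: Replaces A's converging two-pointer sweep over the sorted list by an independent per-index scan that finds each index's best partner with a hand-written bisect_right binary search, keeping the same strict-improvement update so ties resolve identically.
import Mathlib
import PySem

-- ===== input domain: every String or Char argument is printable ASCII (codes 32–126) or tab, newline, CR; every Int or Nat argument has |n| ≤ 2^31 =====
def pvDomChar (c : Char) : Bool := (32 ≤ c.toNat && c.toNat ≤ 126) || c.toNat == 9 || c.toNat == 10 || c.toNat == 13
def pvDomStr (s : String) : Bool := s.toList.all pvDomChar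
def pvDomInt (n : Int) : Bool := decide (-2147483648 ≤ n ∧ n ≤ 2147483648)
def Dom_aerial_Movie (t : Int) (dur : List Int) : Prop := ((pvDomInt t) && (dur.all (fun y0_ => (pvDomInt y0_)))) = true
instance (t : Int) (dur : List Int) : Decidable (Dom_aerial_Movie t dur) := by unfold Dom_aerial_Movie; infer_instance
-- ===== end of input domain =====

-- B replaces A's converging two-pointer sweep by an independent per-index binary-search scan
-- (same O(n log n) cost; objective: alternative). Both Pythons sort `dur` in place; the
-- equivalence proved here is about the RETURN value (the mutation is identical anyway).

-- ===== PORT A =====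
-- the while-loop of A: state (left, right, longest, longest_pair)
def aerialLoopA (s : List Int) (t : Int) (left right longest : Int)
    (pair : Option (List Int)) : Option (List Int) :=
  if h : left < right then
    let summ := PySem.List.pyGetD s left 0 + PySem.List.pyGetD s right 0
    let longest' := if summ ≤ t ∧ longest < summ then summ else longest
    let pair' := if summ ≤ t ∧ longest < summ then
        some [PySem.List.pyGetD s left 0, PySem.List.pyGetD s right 0] else pair
    if summ < t then aerialLoopA s t (left + 1) right longest' pair'
    else aerialLoopA s t left (right - 1) longest' pair'
  else pair
termination_by (right - left).toNat
decreasing_by all_goals omega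

def aerial_Movie (t : Int) (dur : List Int) : Option (List Int) :=
  let t' := t - 30
  let s := PySem.List.sorted dur (fun x => x)
  aerialLoopA s t' 0 ((s.length : Int) - 1) 0 none

-- ===== PORT B =====
-- Source B's hand-written `_bisect_right` is verbatim CPython's bisect.bisect_right; its loop:
def bisectLoopB (a : List Int) (x : Int) (lo hi : Int) : Int :=
  if h : lo < hi then
    let mid := PySem.Int.floordiv (lo + hi) 2
    if x < PySem.List.pyGetD a mid 0 then bisectLoopB a x lo mid
    else bisectLoopB a x (mid + 1) hi
  else lo
termination_by (hi - lo).toNat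
decreasing_by
  · have := PySem.Int.floordiv_two_mid_bounds (le_of_lt h)
    have h2 : PySem.Int.floordiv (lo + hi) 2 < hi :=
      (PySem.Int.floordiv_lt_iff_lt_mul (by omega)).mpr (by omega)
    omega
  · have := PySem.Int.floordiv_two_mid_bounds (le_of_lt h)
    omega

def bisectRightB (a : List Int) (x : Int) : Int :=
  bisectLoopB a x 0 (a.length : Int)

-- one iteration of B's `for i in range(len(dur))` loop, state (longest, longest_pair)
def stepB (s : List Int) (t : Int) (st : Int × Option (List Int)) (i : Int) :
    Int × Option (List Int) :=
  let j := bisectRightB s (t - PySem.List.pyGetD s i 0) - 1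
  if i < j then
    let summ := PySem.List.pyGetD s i 0 + PySem.List.pyGetD s j 0
    if st.1 < summ then (summ, some [PySem.List.pyGetD s i 0, PySem.List.pyGetD s j 0]) else st
  else st

def aerial_Movie_alt (t : Int) (dur : List Int) : Option (List Int) :=
  let t' := t - 30
  let s := PySem.List.sorted dur (fun x => x)
  ((PySem.List.pyRange 0 (s.length : Int) 1).foldl (stepB s t') (0, none)).2

-- ===== PRECONDITION & SPEC =====
def Spec_aerial_Movie (t : Int) (dur : List Int) (out : Option (List Int)) : Prop := out = aerial_Movie_alt t dur
instance (t : Int) (dur : List Int) (out : Option (List Int)) : Decidable (Spec_aerial_Movie t dur out) := by unfold Spec_aerial_Movie; infer_instance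

-- ===== CLAIM (what is proved, stated in full; the proofs are below) =====
def Claim_equal_aerial_Movie : Prop := ∀ (t : Int) (dur : List Int), Dom_aerial_Movie t dur → Spec_aerial_Movie t dur (aerial_Movie t dur)

-- ===== LEMMAS AND PROOFS =====

-- sorted access is monotone in the (Int) index
lemma g_mono {s : List Int} (hs : s.Pairwise (· ≤ ·)) {i j : Int}
    (h0 : 0 ≤ i) (hij : i ≤ j) (hj : j < (s.length : Int)) :
    PySem.List.pyGetD s i 0 ≤ PySem.List.pyGetD s j 0 := by
  have hi : i < (s.length : Int) := lt_of_le_of_lt hij hj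
  rw [PySem.List.pyGetD_eq_getElem s 0 h0 hi, PySem.List.pyGetD_eq_getElem s 0 (le_trans h0 hij) hj]
  rcases eq_or_lt_of_le hij with rfl | hlt
  · exact le_refl _
  · exact (List.pairwise_iff_getElem.mp hs) _ _ _ _ (by omega)

-- binary-search invariant for Source B's _bisect_right
lemma bisectLoopB_inv {s : List Int} (hs : s.Pairwise (· ≤ ·)) (x : Int) :
    ∀ (lo hi : Int), 0 ≤ lo → lo ≤ hi → hi ≤ (s.length : Int) →
    lo ≤ bisectLoopB s x lo hi ∧ bisectLoopB s x lo hi ≤ hi ∧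
    (∀ k : Int, lo ≤ k → k < bisectLoopB s x lo hi → PySem.List.pyGetD s k 0 ≤ x) ∧
    (∀ k : Int, bisectLoopB s x lo hi ≤ k → k < hi → x < PySem.List.pyGetD s k 0) := by
  intro lo hi h0 hlh hhn
  induction hm : (hi - lo).toNat using Nat.strong_induction_on generalizing lo hi with
  | _ n ih =>
  rw [bisectLoopB]
  by_cases h : lo < hi
  · simp only [dif_pos h]
    have hb := PySem.Int.floordiv_two_mid_bounds (le_of_lt h)
    have hmlt : PySem.Int.floordiv (lo + hi) 2 < hi :=
      (PySem.Int.floordiv_lt_iff_lt_mul (by omega)).mpr (by omega)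
    set mid := PySem.Int.floordiv (lo + hi) 2 with hmid
    by_cases hx : x < PySem.List.pyGetD s mid 0
    · simp only [if_pos hx]
      have hrec := ih ((mid - lo).toNat) (by omega) lo mid h0 (by omega) (by omega) rfl
      refine ⟨hrec.1, by omega, hrec.2.2.1, ?_⟩
      intro k hk1 hk2
      by_cases hkm : k < mid
      · exact hrec.2.2.2 k hk1 hkm
      · exact lt_of_lt_of_le hx (g_mono hs (by omega) (by omega) (by omega))
    · simp only [if_neg hx]
      have hrec := ih ((hi - (mid + 1)).toNat) (by omega) (mid + 1) hi (by omega) (by omega) hhn rfl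
      refine ⟨by omega, hrec.2.1, ?_, hrec.2.2.2⟩
      intro k hk1 hk2
      by_cases hkm : mid + 1 ≤ k
      · exact hrec.2.2.1 k hkm hk2
      · exact le_trans (g_mono hs (by omega) (by omega) (by omega)) (not_lt.mp hx)
  · simp only [dif_neg h]
    exact ⟨le_rfl, hlh, fun k hk1 hk2 => absurd hk2 (by omega),
      fun k hk1 hk2 => absurd hk2 (by omega)⟩

lemma bisectRightB_bounds {s : List Int} (hs : s.Pairwise (· ≤ ·)) (x : Int) :
    0 ≤ bisectRightB s x ∧ bisectRightB s x ≤ (s.length : Int) ∧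
    (∀ k : Int, 0 ≤ k → k < bisectRightB s x → PySem.List.pyGetD s k 0 ≤ x) ∧
    (∀ k : Int, bisectRightB s x ≤ k → k < (s.length : Int) → x < PySem.List.pyGetD s k 0) := by
  have h := bisectLoopB_inv hs x 0 (s.length : Int) le_rfl (by positivity) le_rfl
  exact ⟨h.1, h.2.1, h.2.2.1, h.2.2.2⟩

-- a fold whose step fixes the state is the identity
lemma foldl_fix {α β : Type} (f : β → α → β) (st : β) :
    ∀ (xs : List α), (∀ x ∈ xs, f st x = st) → xs.foldl f st = st := by
  intro xs
  induction xs with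
  | nil => intro _; rfl
  | cons y ys ih =>
      intro h
      simp only [List.foldl_cons, h y (by simp)]
      exact ih (fun x hx => h x (by simp [hx]))

-- B's step does nothing when every pair starting at i is invalid or dominated by the state
lemma stepB_noop {s : List Int} (hs : s.Pairwise (· ≤ ·)) {t i : Int}
    {st : Int × Option (List Int)} (hi0 : 0 ≤ i)
    (hdom : ∀ j : Int, i < j → j < (s.length : Int) →
      PySem.List.pyGetD s i 0 + PySem.List.pyGetD s j 0 ≤ t →
      PySem.List.pyGetD s i 0 + PySem.List.pyGetD s j 0 ≤ st.1) :
    stepB s t st i = st := by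
  obtain ⟨hb0, hbn, hb2, hb3⟩ := bisectRightB_bounds hs (t - PySem.List.pyGetD s i 0)
  simp only [stepB]
  by_cases hij : i < bisectRightB s (t - PySem.List.pyGetD s i 0) - 1
  · rw [if_pos hij]
    have hjn : bisectRightB s (t - PySem.List.pyGetD s i 0) - 1 < (s.length : Int) := by omega
    have hjx := hb2 (bisectRightB s (t - PySem.List.pyGetD s i 0) - 1) (by omega) (by omega)
    have hd := hdom _ hij hjn (by omega)
    rw [if_neg (by omega)]
  · rw [if_neg hij]

-- B's step does nothing when (l, r) is valid but dominated, and so is every pair (l, j), r ≤ j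
lemma stepB_skip {s : List Int} (hs : s.Pairwise (· ≤ ·)) {t l r : Int}
    {st : Int × Option (List Int)} (hl0 : 0 ≤ l) (hlr : l < r) (hrn : r < (s.length : Int))
    (hsum : PySem.List.pyGetD s l 0 + PySem.List.pyGetD s r 0 ≤ t)
    (hbig : ∀ j : Int, r ≤ j → j < (s.length : Int) →
      PySem.List.pyGetD s l 0 + PySem.List.pyGetD s j 0 ≤ t →
      PySem.List.pyGetD s l 0 + PySem.List.pyGetD s j 0 ≤ st.1) :
    stepB s t st l = st := by
  obtain ⟨hb0, hbn, hb2, hb3⟩ := bisectRightB_bounds hs (t - PySem.List.pyGetD s l 0)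
  have hrb : r < bisectRightB s (t - PySem.List.pyGetD s l 0) := by
    by_contra hc
    have := hb3 r (by omega) hrn
    omega
  simp only [stepB]
  rw [if_pos (show l < bisectRightB s (t - PySem.List.pyGetD s l 0) - 1 by omega)]
  have hjn : bisectRightB s (t - PySem.List.pyGetD s l 0) - 1 < (s.length : Int) := by omega
  have hjx := hb2 (bisectRightB s (t - PySem.List.pyGetD s l 0) - 1) (by omega) (by omega)
  have hd := hbig _ (by omega) hjn (by omega)
  rw [if_neg (by omega)]

-- when (l, r) is a strict improvement, B's binary search lands exactly on j = r
lemma stepB_update {s : List Int} (hs : s.Pairwise (· ≤ ·)) {t l r : Int}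
    {st : Int × Option (List Int)} (hl0 : 0 ≤ l) (hlr : l < r) (hrn : r < (s.length : Int))
    (hsum : PySem.List.pyGetD s l 0 + PySem.List.pyGetD s r 0 ≤ t)
    (hlt : st.1 < PySem.List.pyGetD s l 0 + PySem.List.pyGetD s r 0)
    (hdomr : ∀ j : Int, r < j → j < (s.length : Int) →
      PySem.List.pyGetD s l 0 + PySem.List.pyGetD s j 0 ≤ t →
      PySem.List.pyGetD s l 0 + PySem.List.pyGetD s j 0 ≤ st.1) :
    stepB s t st l =
      (PySem.List.pyGetD s l 0 + PySem.List.pyGetD s r 0,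
       some [PySem.List.pyGetD s l 0, PySem.List.pyGetD s r 0]) := by
  obtain ⟨hb0, hbn, hb2, hb3⟩ := bisectRightB_bounds hs (t - PySem.List.pyGetD s l 0)
  have hrb : r < bisectRightB s (t - PySem.List.pyGetD s l 0) := by
    by_contra hc
    have := hb3 r (by omega) hrn
    omega
  have hjr : bisectRightB s (t - PySem.List.pyGetD s l 0) - 1 = r := by
    by_contra hc
    have hjn : bisectRightB s (t - PySem.List.pyGetD s l 0) - 1 < (s.length : Int) := by omega
    have hjx := hb2 (bisectRightB s (t - PySem.List.pyGetD s l 0) - 1) (by omega) (by omega)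
    have hmono : PySem.List.pyGetD s r 0 ≤
        PySem.List.pyGetD s (bisectRightB s (t - PySem.List.pyGetD s l 0) - 1) 0 :=
      g_mono hs (by omega) (by omega) hjn
    have := hdomr _ (by omega) hjn (by omega)
    omega
  simp only [stepB]
  rw [hjr, if_pos hlr, if_pos hlt]

-- MAIN LEMMA: A's two-pointer loop agrees with B's remaining fold, under the invariant
-- that every pair (i, j) with l ≤ i < j, r < j is invalid or already dominated by `longest`.
lemma main_lemma {s : List Int} (hs : s.Pairwise (· ≤ ·)) (t : Int) :
    ∀ (l r longest : Int) (pair : Option (List Int)), 0 ≤ l → r < (s.length : Int) →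
    (∀ i j : Int, l ≤ i → i < j → j < (s.length : Int) → r < j →
      PySem.List.pyGetD s i 0 + PySem.List.pyGetD s j 0 ≤ t →
      PySem.List.pyGetD s i 0 + PySem.List.pyGetD s j 0 ≤ longest) →
    aerialLoopA s t l r longest pair =
      ((PySem.List.pyRange l (s.length : Int) 1).foldl (stepB s t) (longest, pair)).2 := by
  intro l r longest pair hl hr hInv
  induction hm : (r - l).toNat using Nat.strong_induction_on generalizing l r longest pair with
  | _ n ih =>
  rw [aerialLoopA]
  by_cases h : l < r
  · simp only [dif_pos h]
    have hln : l < (s.length : Int) := by omega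
    rw [PySem.List.pyRange_one_cons hln, List.foldl_cons]
    by_cases hupd : PySem.List.pyGetD s l 0 + PySem.List.pyGetD s r 0 ≤ t ∧
        longest < PySem.List.pyGetD s l 0 + PySem.List.pyGetD s r 0
    · simp only [if_pos hupd]
      have hstep : stepB s t (longest, pair) l =
          (PySem.List.pyGetD s l 0 + PySem.List.pyGetD s r 0,
           some [PySem.List.pyGetD s l 0, PySem.List.pyGetD s r 0]) :=
        stepB_update hs hl h hr hupd.1 hupd.2
          (fun j hj1 hj2 hj3 => hInv l j le_rfl (by omega) hj2 hj1 hj3)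
      rw [hstep]
      by_cases hlt : PySem.List.pyGetD s l 0 + PySem.List.pyGetD s r 0 < t
      · rw [if_pos hlt]
        exact ih ((r - (l + 1)).toNat) (by omega) (l + 1) r _ _ (by omega) hr
          (fun i j hi hij hjn hrj hsum =>
            le_trans (hInv i j (by omega) hij hjn hrj hsum) (le_of_lt hupd.2)) rfl
      · rw [if_neg hlt]
        have hInv2 : ∀ i j : Int, l ≤ i → i < j → j < (s.length : Int) → r - 1 < j →
            PySem.List.pyGetD s i 0 + PySem.List.pyGetD s j 0 ≤ t →
            PySem.List.pyGetD s i 0 + PySem.List.pyGetD s j 0 ≤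
              PySem.List.pyGetD s l 0 + PySem.List.pyGetD s r 0 := by
          intro i j hi hij hjn hrj hsum
          rcases eq_or_lt_of_le (show r ≤ j by omega) with rfl | hrj'
          · omega
          · exact le_trans (hInv i j hi hij hjn hrj' hsum) (le_of_lt hupd.2)
        have hstep2 : stepB s t
            (PySem.List.pyGetD s l 0 + PySem.List.pyGetD s r 0,
             some [PySem.List.pyGetD s l 0, PySem.List.pyGetD s r 0]) l =
            (PySem.List.pyGetD s l 0 + PySem.List.pyGetD s r 0,
             some [PySem.List.pyGetD s l 0, PySem.List.pyGetD s r 0]) :=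
          stepB_skip hs hl h hr hupd.1
            (fun j hj1 hj2 hj3 => hInv2 l j le_rfl (by omega) hj2 (by omega) hj3)
        calc aerialLoopA s t l (r - 1)
              (PySem.List.pyGetD s l 0 + PySem.List.pyGetD s r 0)
              (some [PySem.List.pyGetD s l 0, PySem.List.pyGetD s r 0])
            = ((PySem.List.pyRange l (s.length : Int) 1).foldl (stepB s t)
                (PySem.List.pyGetD s l 0 + PySem.List.pyGetD s r 0,
                 some [PySem.List.pyGetD s l 0, PySem.List.pyGetD s r 0])).2 :=
              ih ((r - 1 - l).toNat) (by omega) l (r - 1) _ _ hl (by omega) hInv2 rfl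
          _ = _ := by rw [PySem.List.pyRange_one_cons hln, List.foldl_cons, hstep2]
    · simp only [if_neg hupd]
      by_cases hlt : PySem.List.pyGetD s l 0 + PySem.List.pyGetD s r 0 < t
      · rw [if_pos hlt]
        have hstep : stepB s t (longest, pair) l = (longest, pair) := by
          refine stepB_skip hs hl h hr (le_of_lt hlt) ?_
          intro j hj1 hj2 hj3
          rcases eq_or_lt_of_le hj1 with rfl | hj1'
          · have hnb : ¬ longest < PySem.List.pyGetD s l 0 + PySem.List.pyGetD s r 0 :=
              fun hb => hupd ⟨le_of_lt hlt, hb⟩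
            omega
          · exact hInv l j le_rfl (by omega) hj2 hj1' hj3
        rw [hstep]
        exact ih ((r - (l + 1)).toNat) (by omega) (l + 1) r _ _ (by omega) hr
          (fun i j hi hij hjn hrj hsum => hInv i j (by omega) hij hjn hrj hsum) rfl
      · rw [if_neg hlt]
        have hInv2 : ∀ i j : Int, l ≤ i → i < j → j < (s.length : Int) → r - 1 < j →
            PySem.List.pyGetD s i 0 + PySem.List.pyGetD s j 0 ≤ t →
            PySem.List.pyGetD s i 0 + PySem.List.pyGetD s j 0 ≤ longest := by
          intro i j hi hij hjn hrj hsum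
          rcases eq_or_lt_of_le (show r ≤ j by omega) with rfl | hrj'
          · have hgi : PySem.List.pyGetD s l 0 ≤ PySem.List.pyGetD s i 0 :=
              g_mono hs hl hi (by omega)
            have hnb : ¬ longest < PySem.List.pyGetD s l 0 + PySem.List.pyGetD s r 0 :=
              fun hb => hupd ⟨by omega, hb⟩
            omega
          · exact hInv i j hi hij hjn hrj' hsum
        calc aerialLoopA s t l (r - 1) longest pair
            = ((PySem.List.pyRange l (s.length : Int) 1).foldl (stepB s t) (longest, pair)).2 :=
              ih ((r - 1 - l).toNat) (by omega) l (r - 1) _ _ hl (by omega) hInv2 rfl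
          _ = _ := by rw [PySem.List.pyRange_one_cons hln, List.foldl_cons]
  · simp only [dif_neg h]
    rw [foldl_fix]
    intro i hi
    rw [PySem.List.mem_pyRange_one] at hi
    exact stepB_noop hs (by omega)
      (fun j hj1 hj2 hj3 => hInv i j hi.1 hj1 hj2 (by omega) hj3)

-- ===== VERDICT (by name: the statement is the Claim_ definition above) =====
theorem aerial_Movie_spec : Claim_equal_aerial_Movie := by
  intro t dur _
  unfold Spec_aerial_Movie aerial_Movie aerial_Movie_alt
  have hs : (PySem.List.sorted dur (fun x => x)).Pairwise (· ≤ ·) :=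
    PySem.List.sorted_pairwise dur (fun x => x)
  exact main_lemma hs (t - 30) 0 _ 0 none le_rfl (by omega)
    (fun i j _ _ hj hrj _ => absurd hj (by omega))
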